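-- pv_equiv track=rewrite | github.com/hammerlab/immuno_research | hla_peptide_intersect.py | get_allele_to_family_set
-- ===== SOURCE A (Python) =====
-- from collections import defaultdict
--
-- def get_family_to_names(allele_to_set):
--     '''Return a mapping of allele familes to allele names in that
--        family.'''
--     family_to_names = defaultdict(set)
--     for allele_name in allele_to_set.keys():
--         family_name = allele_name[:3]
--         family_to_names[family_name].add(allele_name)
--     return family_to_names
--
-- def get_allele_to_family_set(allele_to_set):
--     '''Returns a mapping of allele to its family's set (without it).'''
--     allele_to_family_set = defaultdict(set)
--     family_to_names = get_family_to_names(allele_to_set)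
--     for allele_name, allele_set in allele_to_set.items():
--         family_name = allele_name[:3]
--         sibling_names = family_to_names[family_name].copy()
--         sibling_names.remove(allele_name)
--         for sibling_name in sibling_names:
--             allele_to_family_set[allele_name].update(
--                     allele_to_set[sibling_name])
--     return allele_to_family_set
-- ===== SOURCE B (Python) =====
-- def get_allele_to_family_set(allele_to_set):
--     '''Returns a mapping of allele to its family's set (without it).
--
--     One pass per family using prefix/suffix unions: the union of all
--     siblings' sets except member i is prefix_union(<i) | suffix_union(>i).
--     '''
--     families = {}
--     for name in allele_to_set:
--         families.setdefault(name[:3], []).append(name)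
--     sib_union = {}
--     for members in families.values():
--         if len(members) < 2:
--             continue
--         k = len(members)
--         suffix = [set() for _ in range(k + 1)]
--         for i in range(k - 1, -1, -1):
--             suffix[i] = allele_to_set[members[i]] | suffix[i + 1]
--         prefix = set()
--         for i, name in enumerate(members):
--             sib_union[name] = prefix | suffix[i + 1]
--             prefix = prefix | allele_to_set[name]
--     return {name: sib_union[name] for name in allele_to_set if name in sib_union}
-- ===== Notes on version B (the rewrite author's own statement) =====
-- stated objective: alternative
-- what changed: Per family, B computes prefix and suffix unions once and forms each allele's all-but-me union as prefix|suffix, instead of A's per-allele re-union over all its siblings' sets.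
import Mathlib
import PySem

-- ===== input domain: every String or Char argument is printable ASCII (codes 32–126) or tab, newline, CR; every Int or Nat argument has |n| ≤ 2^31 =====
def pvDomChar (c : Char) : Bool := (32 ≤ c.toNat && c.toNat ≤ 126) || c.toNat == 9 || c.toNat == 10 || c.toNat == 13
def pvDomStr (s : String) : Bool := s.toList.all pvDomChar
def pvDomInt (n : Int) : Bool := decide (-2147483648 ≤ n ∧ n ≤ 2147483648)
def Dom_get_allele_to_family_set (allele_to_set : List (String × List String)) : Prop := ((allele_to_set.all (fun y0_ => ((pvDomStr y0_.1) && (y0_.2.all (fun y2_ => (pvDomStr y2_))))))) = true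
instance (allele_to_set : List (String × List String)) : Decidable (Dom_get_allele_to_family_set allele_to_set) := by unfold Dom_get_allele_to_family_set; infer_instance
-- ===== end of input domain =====

-- ===== PORT A =====
-- header: B replaces A's per-allele union over all siblings by per-family prefix/suffix unions (alternative algorithm);
-- equivalence is about return values (neither mutates its argument). Python set values are compared as sets (PySem.Set).
-- get_family_to_names: family name -> set of allele names in that family (defaultdict(set) modelled by getD/insert)
def pvFamToNames (keysL : List String) : PySem.Dict String (PySem.Set String) :=
  keysL.foldl (fun ftn name =>
      ftn.insert (PySem.Str.slice name none (some 3))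
        (PySem.Set.add (ftn.getD (PySem.Str.slice name none (some 3)) PySem.Set.empty) name))
    PySem.Dict.empty

def get_allele_to_family_set (allele_to_set : List (String × List String)) : List (String × List String) :=
  let d := PySem.Dict.ofList allele_to_set
  let ftn := pvFamToNames d.keys
  -- sibling_names.remove(allele_name): allele_name is always a member of its own family's set,
  -- so Python's .remove never raises here and Set.discard is exact.
  let res : PySem.Dict String (PySem.Set String) :=
    d.items.foldl (fun acc p =>
        let sibs := PySem.Set.discard (ftn.getD (PySem.Str.slice p.1 none (some 3)) PySem.Set.empty) p.1
        sibs.foldl (fun acc2 sib =>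
            acc2.modify p.1 PySem.Set.empty (fun s => PySem.Set.update s (d.getD sib [])))
          acc)
      PySem.Dict.empty
  res.items

-- ===== PORT B =====
-- families: family name -> list of member allele names, in key order (setdefault(...).append = modify appending)
def pvFamilies (keysL : List String) : PySem.Dict String (List String) :=
  keysL.foldl (fun fs name =>
      fs.modify (PySem.Str.slice name none (some 3)) [] (fun l => l ++ [name]))
    PySem.Dict.empty

-- suffix[i] = union of members' sets from index i to the end (Source B's downward index loop,
-- written as structural recursion from the right); entry 0 is the head, entry k is the empty set
def pvSuffixUnions (d : PySem.Dict String (List String)) : List String → List (PySem.Set String)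
  | [] => [PySem.Set.empty]
  | m :: ms =>
      let rest := pvSuffixUnions d ms
      PySem.Set.union (PySem.Set.ofList (d.getD m [])) rest.headI :: rest

-- the enumerate loop: sib_union[name] = prefix | suffix[i+1]; prefix |= allele_to_set[name]
def pvAssign (d : PySem.Dict String (List String)) :
    PySem.Set String → List String → List (PySem.Set String) →
    PySem.Dict String (PySem.Set String) → PySem.Dict String (PySem.Set String)
  | pre, name :: rest, suf :: sufRest, su =>
      pvAssign d (PySem.Set.union pre (PySem.Set.ofList (d.getD name []))) rest sufRest
        (su.insert name (PySem.Set.union pre suf))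
  | _, _, _, su => su

def get_allele_to_family_set_alt (allele_to_set : List (String × List String)) : List (String × List String) :=
  let d := PySem.Dict.ofList allele_to_set
  let fams := pvFamilies d.keys
  let su : PySem.Dict String (PySem.Set String) :=
    fams.values.foldl (fun su members =>
        if members.length < 2 then su
        else pvAssign d PySem.Set.empty members (pvSuffixUnions d members).tail su)
      PySem.Dict.empty
  (d.keys.filter (fun n => su.contains n)).map (fun n => (n, su.getD n []))

-- ===== PRECONDITION & SPEC =====
def Spec_get_allele_to_family_set (allele_to_set : List (String × List String)) (out : List (String × List String)) : Prop := out = get_allele_to_family_set_alt allele_to_set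
instance (allele_to_set : List (String × List String)) (out : List (String × List String)) : Decidable (Spec_get_allele_to_family_set allele_to_set out) := by unfold Spec_get_allele_to_family_set; infer_instance

-- ===== CLAIM (what is proved, stated in full; the proofs are below) =====
def Claim_equal_get_allele_to_family_set : Prop := ∀ (allele_to_set : List (String × List String)), Dom_get_allele_to_family_set allele_to_set → Spec_get_allele_to_family_set allele_to_set (get_allele_to_family_set allele_to_set)

-- ===== LEMMAS AND PROOFS =====

-- proof-side value of the per-family enumerate loop: the list of (member, all-but-me union) pairs
def pvSibList (g : String → List String) (pre : PySem.Set String) : List String → List (String × PySem.Set String)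
  | [] => []
  | m :: rest => (m, PySem.Set.update pre (rest.flatMap g)) :: pvSibList g (PySem.Set.update pre (g m)) rest

-- updating with a deduplicated list is updating with the list
theorem pv_update_ofList {s : PySem.Set String} {ys : List String} :
    PySem.Set.update s (PySem.Set.ofList ys) = PySem.Set.update s ys := by
  rw [PySem.Set.update_eq_append_filter, PySem.Set.update_eq_append_filter, PySem.Set.ofList_ofList]

-- A-side: lookup in the family_to_names fold
theorem pv_famToNames_getD (key : String → String) (l : List String) :
    ∀ (acc : PySem.Dict String (PySem.Set String)) (f : String),
    (l.foldl (fun ftn name =>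
        ftn.insert (key name) (PySem.Set.add (ftn.getD (key name) PySem.Set.empty) name)) acc).getD f PySem.Set.empty
      = PySem.Set.update (acc.getD f PySem.Set.empty) (l.filter (fun m => key m == f)) := by
  induction l with
  | nil => intro acc f; simp [PySem.Set.update]
  | cons x xs ih =>
    intro acc f
    simp only [List.foldl_cons, List.filter_cons, ih, PySem.Dict.getD_insert]
    by_cases h : f = key x
    · subst h
      simp [PySem.Set.update_cons]
    · have hb : (key x == f) = false := by simp [Ne.symm h]
      simp [h, hb]

-- A-side: a chain of set updates is one update with the concatenation
theorem pv_foldl_set_update (g : String → List String) (ss : List String) :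
    ∀ (s0 : PySem.Set String),
    ss.foldl (fun s m => PySem.Set.update s (g m)) s0 = PySem.Set.update s0 (ss.flatMap g) := by
  induction ss with
  | nil => intro s0; simp [PySem.Set.update]
  | cons x xs ih => intro s0; simp [ih, PySem.Set.update_append]

-- A-side: a chain of modifies at one key is one insert
theorem pv_foldl_modify_chain (g : String → List String) (n : String) (ss : List String) (hne : ss ≠ []) :
    ∀ (acc : PySem.Dict String (PySem.Set String)),
    ss.foldl (fun acc2 sib => acc2.modify n PySem.Set.empty (fun s => PySem.Set.update s (g sib))) acc
      = acc.insert n (ss.foldl (fun s sib => PySem.Set.update s (g sib)) (acc.getD n PySem.Set.empty)) := by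
  induction ss with
  | nil => exact absurd rfl hne
  | cons x xs ih =>
    intro acc
    simp only [List.foldl_cons]
    rcases xs with _ | ⟨y, ys⟩
    · simp [PySem.Dict.modify]
    · rw [ih (by simp)]
      simp [PySem.Dict.modify, PySem.Dict.getD_insert_self, PySem.Dict.insert_insert_self]

-- A-side: the outer loop over the alleles
theorem pv_outerA (sibs : String → PySem.Set String) (g : String → List String) (l : List String) :
    ∀ (acc : PySem.Dict String (PySem.Set String)), l.Nodup → (∀ n ∈ l, acc.contains n = false) →
    (l.foldl (fun acc n =>
        (sibs n).foldl (fun acc2 sib => acc2.modify n PySem.Set.empty (fun s => PySem.Set.update s (g sib))) acc) acc).items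
      = acc.items ++ (l.filter (fun n => !(sibs n).isEmpty)).map
          (fun n => (n, PySem.Set.update PySem.Set.empty ((sibs n).flatMap g))) := by
  induction l with
  | nil => intro acc _ _; simp
  | cons x xs ih =>
    intro acc hnd hfresh
    have hx : acc.contains x = false := hfresh x (by simp)
    simp only [List.foldl_cons, List.filter_cons]
    rcases he : sibs x with _ | ⟨s, ss⟩
    · simpa [he] using ih acc hnd.of_cons (fun n hn => hfresh n (List.mem_cons_of_mem _ hn))
    · have hchain := pv_foldl_modify_chain g x (s :: ss) (by simp) acc
      rw [PySem.Dict.getD_of_not_contains _ _ hx] at hchain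
      rw [hchain, pv_foldl_set_update]
      have hfresh' : ∀ n ∈ xs, (acc.insert x (PySem.Set.update PySem.Set.empty ((s :: ss).flatMap g))).contains n = false := by
        intro n hn
        rw [PySem.Dict.contains_insert]
        have hnx : (n == x) = false := by
          simp only [beq_eq_false_iff_ne, ne_eq]
          exact fun hexact => (List.nodup_cons.mp hnd).1 (hexact ▸ hn)
        simp [hnx, hfresh n (List.mem_cons_of_mem _ hn)]
      rw [ih _ hnd.of_cons hfresh']
      rw [PySem.Dict.items_insert_of_not_contains _ _ hx]
      simp [he]

-- B-side: the head of the suffix-union list is the union of all remaining sets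
theorem pv_suffix_headI (d : PySem.Dict String (List String)) (ms : List String) :
    (pvSuffixUnions d ms).headI = PySem.Set.ofList (ms.flatMap (fun m => d.getD m [])) := by
  induction ms with
  | nil => simp [pvSuffixUnions, PySem.Set.ofList_nil, PySem.Set.empty]
  | cons m ms ih =>
    show ((PySem.Set.ofList (d.getD m [])).update (pvSuffixUnions d ms).headI
        :: pvSuffixUnions d ms).headI = _
    rw [List.headI_cons, ih, pv_update_ofList, List.flatMap_cons, PySem.Set.ofList_append]

theorem pv_suffix_ne_nil (d : PySem.Dict String (List String)) (ms : List String) :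
    pvSuffixUnions d ms ≠ [] := by
  cases ms <;> simp [pvSuffixUnions]

-- B-side: what pvAssign appends to the accumulator dict
theorem pv_assign_items (d : PySem.Dict String (List String)) (ms : List String) :
    ∀ (pre : PySem.Set String) (su : PySem.Dict String (PySem.Set String)),
    ms.Nodup → (∀ n ∈ ms, su.contains n = false) →
    (pvAssign d pre ms (pvSuffixUnions d ms).tail su).items
      = su.items ++ pvSibList (fun m => d.getD m []) pre ms := by
  induction ms with
  | nil => intro pre su _ _; simp [pvAssign, pvSibList]
  | cons m rest ih =>
    intro pre su hnd hfresh
    have hm : su.contains m = false := hfresh m (by simp)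
    rcases he : pvSuffixUnions d rest with _ | ⟨s, srest⟩
    · exact absurd he (pv_suffix_ne_nil d rest)
    · have hs : s = PySem.Set.ofList (rest.flatMap (fun m => d.getD m [])) := by
        have := pv_suffix_headI d rest
        rw [he] at this; simpa using this
      have htail : (pvSuffixUnions d (m :: rest)).tail = pvSuffixUnions d rest := by
        simp [pvSuffixUnions]
      rw [htail, he]
      show (pvAssign d (PySem.Set.union pre (PySem.Set.ofList (d.getD m []))) rest srest
              (su.insert m (PySem.Set.union pre s))).items = _
      rw [show srest = (pvSuffixUnions d rest).tail by rw [he]; rfl, ih _ _ hnd.of_cons ?fresh]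
      case fresh =>
        intro n hn
        rw [PySem.Dict.contains_insert]
        have hnm : (n == m) = false := by
          simp only [beq_eq_false_iff_ne, ne_eq]
          exact fun hexact => (List.nodup_cons.mp hnd).1 (hexact ▸ hn)
        simp [hnm, hfresh n (List.mem_cons_of_mem _ hn)]
      rw [PySem.Dict.items_insert_of_not_contains _ _ hm]
      simp only [pvSibList, hs, PySem.Set.union, pv_update_ofList, List.append_assoc,
        List.cons_append, List.nil_append]

theorem pv_sibList_fst (g : String → List String) (ms : List String) :
    ∀ pre, (pvSibList g pre ms).map Prod.fst = ms := by
  induction ms with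
  | nil => intro pre; simp [pvSibList]
  | cons m rest ih => intro pre; simp [pvSibList, ih]

-- B-side: the fold over the family lists
theorem pv_su_items (d : PySem.Dict String (List String)) (fss : List (List String)) :
    ∀ (su : PySem.Dict String (PySem.Set String)),
    (fss.flatMap id).Nodup → (∀ n ∈ fss.flatMap id, su.contains n = false) →
    (fss.foldl (fun su members =>
        if members.length < 2 then su
        else pvAssign d PySem.Set.empty members (pvSuffixUnions d members).tail su) su).items
      = su.items ++ fss.flatMap (fun ms =>
          if ms.length < 2 then [] else pvSibList (fun m => d.getD m []) PySem.Set.empty ms) := by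
  induction fss with
  | nil => intro su _ _; simp
  | cons ms fss ih =>
    intro su hnd hfresh
    have hnd' : (fss.flatMap id).Nodup := by
      simp only [List.flatMap_cons, List.nodup_append, id] at hnd
      exact hnd.2.1
    have hmsnd : ms.Nodup := by
      simp only [List.flatMap_cons, List.nodup_append, id] at hnd
      exact hnd.1
    simp only [List.foldl_cons, List.flatMap_cons]
    by_cases hlen : ms.length < 2
    · rw [if_pos hlen, if_pos hlen, ih su hnd' (fun n hn => hfresh n (by simp at hn ⊢; exact .inr hn))]
      simp
    · rw [if_neg hlen, if_neg hlen]
      have hfr : ∀ n ∈ ms, su.contains n = false := fun n hn =>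
        hfresh n (by simp only [List.flatMap_cons, List.mem_append, id]; exact .inl hn)
      have hasn := pv_assign_items d ms PySem.Set.empty su hmsnd hfr
      rw [ih _ hnd' ?fresh, hasn, List.append_assoc]
      case fresh =>
        intro n hn
        have hn' : n ∈ fss.flatMap id := by simpa using hn
        have hkeys : (pvAssign d PySem.Set.empty ms (pvSuffixUnions d ms).tail su).keys = su.keys ++ ms := by
          simp only [PySem.Dict.keys, hasn, List.map_append, pv_sibList_fst]
        rcases hc : (pvAssign d PySem.Set.empty ms (pvSuffixUnions d ms).tail su).contains n with _ | _
        · rfl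
        · exfalso
          have hmem := (PySem.Dict.contains_iff_mem_keys _ _).mp hc
          rw [hkeys, List.mem_append] at hmem
          rcases hmem with h | h
          · have hsu := hfresh n (by
              simp only [List.flatMap_cons, List.mem_append, id]
              exact .inr hn')
            have := (PySem.Dict.contains_iff_mem_keys su n).mpr h
            rw [hsu] at this
            exact Bool.false_ne_true this
          · simp only [List.flatMap_cons, List.nodup_append, id] at hnd
            exact hnd.2.2 n h n hn' rfl

-- the pair of a member inside pvSibList
theorem pv_sibList_mem (g : String → List String) (n : String) (b : List String) (a : List String) :
    ∀ (pre : PySem.Set String),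
    (n, PySem.Set.update pre (a.flatMap g ++ b.flatMap g)) ∈ pvSibList g pre (a ++ n :: b) := by
  induction a with
  | nil => intro pre; simp [pvSibList]
  | cons x a ih =>
    intro pre
    have heq : PySem.Set.update pre ((x :: a).flatMap g ++ b.flatMap g)
        = PySem.Set.update (PySem.Set.update pre (g x)) (a.flatMap g ++ b.flatMap g) := by
      rw [← PySem.Set.update_append, List.flatMap_cons, List.append_assoc]
    rw [List.cons_append, heq]
    exact List.mem_cons_of_mem _ (ih (PySem.Set.update pre (g x)))


-- B-side: lookup in the families dict
theorem pv_families_getD (key : String → String) (K : List String) (f : String) :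
    (K.foldl (fun fs name => fs.modify (key name) [] (fun l => l ++ [name])) PySem.Dict.empty).getD f []
      = K.filter (fun n => key n == f) := by
  have h := PySem.Dict.getD_foldl_modify_append (K.map (fun n => (key n, n))) PySem.Dict.empty f
  rw [List.foldl_map] at h
  simpa [List.filter_map, Function.comp_def] using h

-- B-side: keys of the families dict
theorem pv_families_keys (key : String → String) (K : List String) :
    (K.foldl (fun fs name => fs.modify (key name) [] (fun l => l ++ [name])) PySem.Dict.empty).keys
      = PySem.Set.ofList (K.map key) := by
  have h := PySem.Dict.keys_foldl_modify_key K key [] (fun _ x v => v ++ [x]) PySem.Dict.empty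
  simpa [PySem.Dict.keys_empty, PySem.Set.update_nil_left] using h

-- the concatenation of the (distinct) family member lists has no duplicates
theorem pv_flatten_nodup (key : String → String) (K : List String) (hK : K.Nodup)
    (F : List String) (hF : F.Nodup) :
    (F.flatMap (fun f => K.filter (fun n => key n == f))).Nodup := by
  induction F with
  | nil => simp
  | cons f F ih =>
    simp only [List.flatMap_cons, List.nodup_append]
    refine ⟨hK.filter _, ih hF.of_cons, ?_⟩
    intro x hx y hy hxy
    subst hxy
    rw [List.mem_filter] at hx
    rw [List.mem_flatMap] at hy
    obtain ⟨f', hf', hyf'⟩ := hy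
    rw [List.mem_filter] at hyf'
    have h1 : key x = f := by simpa using hx.2
    have h2 : key x = f' := by simpa using hyf'.2
    exact (List.nodup_cons.mp hF).1 (h1 ▸ h2 ▸ hf')

-- the kept family lists form a sublist of the concatenation of all of them
theorem pv_if_sublist (fss : List (List String)) :
    (fss.flatMap (fun ms => if ms.length < 2 then [] else ms)).Sublist (fss.flatMap id) := by
  induction fss with
  | nil => simp
  | cons ms fss ih =>
    simp only [List.flatMap_cons, id]
    by_cases h : ms.length < 2
    · rw [if_pos h]
      simpa using ((List.nil_sublist ms).append ih)
    · rw [if_neg h]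
      exact (List.Sublist.refl ms).append ih

-- ===== VERDICT (by name: the statement is the Claim_ definition above) =====


theorem get_allele_to_family_set_spec : Claim_equal_get_allele_to_family_set := by
  intro l _hdom
  show get_allele_to_family_set l = get_allele_to_family_set_alt l
  simp only [get_allele_to_family_set, get_allele_to_family_set_alt, pvFamToNames, pvFamilies]
  set d := PySem.Dict.ofList l with hd
  have hK : d.keys.Nodup := PySem.Dict.nodup_keys_ofList l
  -- the family_to_names lookup (A side)
  have hftn : ∀ f, (List.foldl (fun ftn name =>
        ftn.insert (PySem.Str.slice name none (some 3))
          ((ftn.getD (PySem.Str.slice name none (some 3)) PySem.Set.empty).add name))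
        PySem.Dict.empty d.keys).getD f PySem.Set.empty
      = PySem.Set.ofList (d.keys.filter (fun m => PySem.Str.slice m none (some 3) == f)) := by
    intro f
    rw [pv_famToNames_getD (fun n => PySem.Str.slice n none (some 3)) d.keys PySem.Dict.empty f]
    simp [PySem.Dict.getD_empty, PySem.Set.empty, PySem.Set.update_nil_left]
  simp only [hftn]
  -- A's outer loop
  rw [show d.items = d.keys.map (fun n => (n, d.getD n [])) from PySem.Dict.items_eq_map_keys d hK []]
  simp only [List.foldl_map]
  rw [pv_outerA (fun n => PySem.Set.discard (PySem.Set.ofList (d.keys.filter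
        (fun m => PySem.Str.slice m none (some 3) == PySem.Str.slice n none (some 3)))) n)
      (fun sib => d.getD sib []) d.keys PySem.Dict.empty hK
      (fun n _ => PySem.Dict.contains_empty n)]
  -- B's families dict
  have hfkeys := pv_families_keys (fun n => PySem.Str.slice n none (some 3)) d.keys
  have hfnodup : (List.foldl (fun fs name =>
      fs.modify (PySem.Str.slice name none (some 3)) [] fun l => l ++ [name])
      PySem.Dict.empty d.keys).keys.Nodup := by
    rw [hfkeys]; exact PySem.Set.nodup_ofList _
  have hfvals : (List.foldl (fun fs name =>
        fs.modify (PySem.Str.slice name none (some 3)) [] fun l => l ++ [name])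
        PySem.Dict.empty d.keys).values
      = (PySem.Set.ofList (d.keys.map (fun n => PySem.Str.slice n none (some 3)))).map
          (fun f => d.keys.filter (fun n => PySem.Str.slice n none (some 3) == f)) := by
    rw [PySem.Dict.values_eq_map_keys _ hfnodup [], hfkeys]
    exact List.map_congr_left (fun f _ =>
      pv_families_getD (fun n => PySem.Str.slice n none (some 3)) d.keys f)
  rw [hfvals]
  set fss0 := (PySem.Set.ofList (d.keys.map (fun n => PySem.Str.slice n none (some 3)))).map
      (fun f => d.keys.filter (fun n => PySem.Str.slice n none (some 3) == f)) with hfss0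
  -- the concatenation of all family member lists is duplicate-free
  have hflat : (fss0.flatMap id).Nodup := by
    rw [hfss0, List.flatMap_map]
    exact pv_flatten_nodup (fun n => PySem.Str.slice n none (some 3)) d.keys hK _
      (PySem.Set.nodup_ofList _)
  set su := fss0.foldl (fun su members =>
      if members.length < 2 then su
      else pvAssign d PySem.Set.empty members (pvSuffixUnions d members).tail su)
      PySem.Dict.empty with hsu0
  have hsuitems : su.items = fss0.flatMap (fun ms =>
      if ms.length < 2 then [] else pvSibList (fun m => d.getD m []) PySem.Set.empty ms) := by
    rw [hsu0, pv_su_items d fss0 PySem.Dict.empty hflat (fun n _ => PySem.Dict.contains_empty n)]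
    rfl
  have hsukeys : su.keys = fss0.flatMap (fun ms => if ms.length < 2 then [] else ms) := by
    simp only [PySem.Dict.keys, hsuitems, List.map_flatMap]
    refine List.flatMap_congr (fun ms _ => ?_)
    by_cases h : ms.length < 2
    · simp [h]
    · simp only [if_neg h]
      exact pv_sibList_fst (fun m => d.getD m []) ms PySem.Set.empty
  have hsunodup : su.keys.Nodup := by
    rw [hsukeys]; exact List.Nodup.sublist (pv_if_sublist fss0) hflat
  -- decomposition of a family around one of its members
  have hdecomp : ∀ n ∈ d.keys, ∃ a b,
      d.keys.filter (fun m => PySem.Str.slice m none (some 3) == PySem.Str.slice n none (some 3)) = a ++ n :: b ∧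
      n ∉ a ∧ n ∉ b ∧
      PySem.Set.discard (PySem.Set.ofList (d.keys.filter
        (fun m => PySem.Str.slice m none (some 3) == PySem.Str.slice n none (some 3)))) n = a ++ b := by
    intro n hn
    have hfnd0 : (d.keys.filter (fun m =>
        PySem.Str.slice m none (some 3) == PySem.Str.slice n none (some 3))).Nodup := hK.filter _
    have hmemf : n ∈ d.keys.filter (fun m =>
        PySem.Str.slice m none (some 3) == PySem.Str.slice n none (some 3)) :=
      List.mem_filter.mpr ⟨hn, by simp⟩
    obtain ⟨a, b, hab⟩ := List.append_of_mem hmemf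
    have hfnd := hfnd0
    rw [hab, List.nodup_append] at hfnd
    have hna : n ∉ a := fun h => hfnd.2.2 n h n (List.mem_cons_self) rfl
    have hnb : n ∉ b := (List.nodup_cons.mp hfnd.2.1).1
    refine ⟨a, b, hab, hna, hnb, ?_⟩
    rw [PySem.Set.ofList_eq_self_of_nodup _ hfnd0, hab]
    show (a ++ n :: b).filter (fun y => !(y == n)) = a ++ b
    rw [List.filter_append, List.filter_cons]
    have ha' : a.filter (fun y => !(y == n)) = a :=
      List.filter_eq_self.mpr (fun y hy => by
        simp only [Bool.not_eq_eq_eq_not, Bool.not_true, beq_eq_false_iff_ne, ne_eq]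
        exact fun h => hna (h ▸ hy))
    have hb' : b.filter (fun y => !(y == n)) = b :=
      List.filter_eq_self.mpr (fun y hy => by
        simp only [Bool.not_eq_eq_eq_not, Bool.not_true, beq_eq_false_iff_ne, ne_eq]
        exact fun h => hnb (h ▸ hy))
    simp [ha', hb']
  -- membership of the per-allele pair in su
  have hmem : ∀ n ∈ d.keys, ∀ a b,
      d.keys.filter (fun m => PySem.Str.slice m none (some 3) == PySem.Str.slice n none (some 3)) = a ++ n :: b →
      a ++ b ≠ [] →
      (n, PySem.Set.update PySem.Set.empty
          (a.flatMap (fun m => d.getD m []) ++ b.flatMap (fun m => d.getD m []))) ∈ su.items := by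
    intro n hn a b hab hne
    rw [hsuitems, List.mem_flatMap]
    refine ⟨d.keys.filter (fun m =>
        PySem.Str.slice m none (some 3) == PySem.Str.slice n none (some 3)), ?_, ?_⟩
    · rw [hfss0]
      exact List.mem_map.mpr ⟨PySem.Str.slice n none (some 3),
        (PySem.Set.mem_ofList _ _).mpr (List.mem_map_of_mem hn), rfl⟩
    · have hlen : ¬ (d.keys.filter (fun m =>
          PySem.Str.slice m none (some 3) == PySem.Str.slice n none (some 3))).length < 2 := by
        rw [hab]
        have := List.length_pos_of_ne_nil hne
        rw [List.length_append] at this ⊢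
        simp only [List.length_cons]
        omega
      rw [if_neg hlen, hab]
      exact pv_sibList_mem (fun m => d.getD m []) n b a PySem.Set.empty
  have hcontTrue : ∀ n ∈ d.keys, ∀ a b,
      d.keys.filter (fun m => PySem.Str.slice m none (some 3) == PySem.Str.slice n none (some 3)) = a ++ n :: b →
      a ++ b ≠ [] → su.contains n = true := by
    intro n hn a b hab hne
    exact (PySem.Dict.contains_iff_mem_keys su n).mpr
      (PySem.Dict.mem_keys_of_mem_items su (hmem n hn a b hab hne))
  have hcontFalse : ∀ n ∈ d.keys,
      d.keys.filter (fun m => PySem.Str.slice m none (some 3) == PySem.Str.slice n none (some 3)) = [n] →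
      su.contains n = false := by
    intro n hn hsingle
    rcases hc : su.contains n with _ | _
    · rfl
    exfalso
    have hk := (PySem.Dict.contains_iff_mem_keys su n).mp hc
    rw [hsukeys, List.mem_flatMap] at hk
    obtain ⟨ms, hms, hnms⟩ := hk
    by_cases hl : ms.length < 2
    · rw [if_pos hl] at hnms
      simp at hnms
    · rw [if_neg hl] at hnms
      rw [hfss0, List.mem_map] at hms
      obtain ⟨f, _, rfl⟩ := hms
      have hf : PySem.Str.slice n none (some 3) = f := by
        have := List.mem_filter.mp hnms
        simpa using this.2
      rw [← hf, hsingle] at hl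
      exact hl (by simp)
  -- the two outputs coincide pointwise
  have hempty : (PySem.Dict.empty : PySem.Dict String (PySem.Set String)).items = [] := rfl
  rw [hempty, List.nil_append]
  have hpred : ∀ n ∈ d.keys,
      (!(PySem.Set.discard (PySem.Set.ofList (d.keys.filter
          (fun m => PySem.Str.slice m none (some 3) == PySem.Str.slice n none (some 3)))) n).isEmpty)
        = su.contains n := by
    intro n hn
    obtain ⟨a, b, hab, hna, hnb, hdisc⟩ := hdecomp n hn
    rw [hdisc]
    rcases hab' : a ++ b with _ | ⟨x, xs⟩
    · rcases List.append_eq_nil_iff.mp hab' with ⟨rfl, rfl⟩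
      rw [hcontFalse n hn (by simpa using hab)]
      simp
    · rw [hcontTrue n hn a b hab (by rw [hab']; simp)]
      simp
  rw [List.filter_congr hpred]
  refine List.map_congr_left ?_
  intro n hn
  have hn' : n ∈ d.keys := (List.mem_filter.mp hn).1
  have hcn : su.contains n = true := by simpa using (List.mem_filter.mp hn).2
  obtain ⟨a, b, hab, hna, hnb, hdisc⟩ := hdecomp n hn'
  have hne : a ++ b ≠ [] := by
    intro h0
    rcases List.append_eq_nil_iff.mp h0 with ⟨rfl, rfl⟩
    rw [hcontFalse n hn' (by simpa using hab)] at hcn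
    exact Bool.false_ne_true hcn
  have hget := PySem.Dict.getD_of_mem_items su (hmem n hn' a b hab hne) hsunodup []
  rw [hdisc, hget, List.flatMap_append]
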